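-- pv_equiv track=rewrite | github.com/jihshiann/Diffusion_Tree | decisionTree_CART.py | assign_group_by_feature_prefix
-- ===== SOURCE A (Python) =====
-- def assign_group_by_feature_prefix(rule_paths, threshold):
--     """
--     根據每個 target 的規則路徑（僅取 split_feature 部分）進行分組，
--     若某前綴下 target 數超過 threshold，則用更長前綴細分。
--     """
--     groups_temp = {}
--     for target, path in rule_paths.items():
--         feature_path = tuple(rule[0] for rule in path)
--         for k in range(1, len(feature_path)+1):
--             prefix = feature_path[:k]
--             groups_temp.setdefault(prefix, []).append(target)
--     final_groups = {}
--     for target, path in rule_paths.items():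
--         feature_path = tuple(rule[0] for rule in path)
--         assigned_prefix = feature_path
--         for k in range(1, len(feature_path)+1):
--             prefix = feature_path[:k]
--             if len(groups_temp[prefix]) <= threshold:
--                 assigned_prefix = prefix
--                 break
--         final_groups[target] = assigned_prefix
--     return final_groups
-- ===== SOURCE B (Python) =====
-- def assign_group_by_feature_prefix(rule_paths, threshold):
--     feats = [(t, tuple(r[0] for r in p)) for t, p in rule_paths.items()]
--     paths = [fp for _, fp in feats]
--     out = {}
--     for t, fp in feats:
--         assigned = fp
--         for k in range(1, len(fp) + 1):
--             if sum(1 for q in paths if q[:k] == fp[:k]) <= threshold: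
--                 assigned = fp[:k]
--                 break
--         out[t] = assigned
--     return out
-- ===== Notes on version B (the rewrite author's own statement) =====
-- stated objective: simpler
-- what changed: B drops A's grouping dictionary (prefix -> list of member targets) entirely: for each target it finds the shortest usable prefix by directly counting, with a scan over the feature paths, how many paths share that prefix.
import Mathlib
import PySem

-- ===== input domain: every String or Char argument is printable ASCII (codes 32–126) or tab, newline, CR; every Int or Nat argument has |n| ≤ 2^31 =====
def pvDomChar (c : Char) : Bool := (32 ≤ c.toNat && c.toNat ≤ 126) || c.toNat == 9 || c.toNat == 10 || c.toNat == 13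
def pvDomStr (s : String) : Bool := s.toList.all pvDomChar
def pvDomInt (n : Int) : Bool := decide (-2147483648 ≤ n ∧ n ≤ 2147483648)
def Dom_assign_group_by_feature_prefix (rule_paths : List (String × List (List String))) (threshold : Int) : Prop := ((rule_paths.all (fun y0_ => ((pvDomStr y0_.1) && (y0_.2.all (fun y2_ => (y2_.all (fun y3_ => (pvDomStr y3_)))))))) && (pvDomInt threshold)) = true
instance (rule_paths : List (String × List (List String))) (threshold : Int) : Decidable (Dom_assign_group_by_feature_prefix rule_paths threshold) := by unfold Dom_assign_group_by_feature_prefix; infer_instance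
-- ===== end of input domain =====

-- B removes A's prefix→members grouping dictionary: it counts the targets sharing each
-- feature prefix by a direct scan over the feature paths (objective: simpler, no index built).


-- ===== PORT A =====
-- tuple(rule[0] for rule in path); rule[0] ported as headD "" — exact under Pre_ (every rule nonempty)
def pvFeat (path : List (List String)) : List String := path.map (fun rule => rule.headD "")

-- rule_paths is a Python dict: duplicate keys overwrite (insertion order kept); .items() order
def assign_group_by_feature_prefix (rule_paths : List (String × List (List String))) (threshold : Int) : List (String × List String) :=
  let items := (PySem.Dict.ofList rule_paths).items
  -- first loop: groups_temp.setdefault(prefix, []).append(target); fp[:k] with 1 ≤ k is fp.take k.toNat (PySem.List.slice_to)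
  let groups_temp : PySem.Dict (List String) (List String) :=
    items.foldl (fun d tp =>
      let fp := pvFeat tp.2
      (PySem.List.pyRange 1 ((fp.length : Int) + 1)).foldl
        (fun d k => d.modify (fp.take k.toNat) [] (fun v => v ++ [tp.1])) d)
      PySem.Dict.empty
  -- second loop: first k with len(groups_temp[prefix]) <= threshold (break loop = find?), else the full path
  let final_groups : PySem.Dict String (List String) :=
    items.foldl (fun d tp =>
      let fp := pvFeat tp.2
      let assigned :=
        match (PySem.List.pyRange 1 ((fp.length : Int) + 1)).find?
            (fun k => decide (((groups_temp.getD (fp.take k.toNat) []).length : Int) ≤ threshold)) with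
        | some k => fp.take k.toNat
        | none => fp
      d.insert tp.1 assigned) PySem.Dict.empty
  final_groups.items

-- ===== PORT B =====
def assign_group_by_feature_prefix_alt (rule_paths : List (String × List (List String))) (threshold : Int) : List (String × List String) :=
  let feats := (PySem.Dict.ofList rule_paths).items.map (fun tp => (tp.1, pvFeat tp.2))
  let paths := feats.map (fun tf => tf.2)
  -- sum(1 for q in paths if q[:k] == fp[:k]) <= threshold, first such k (break loop = find?)
  let out : PySem.Dict String (List String) :=
    feats.foldl (fun d tf =>
      let fp := tf.2
      let assigned :=
        match (PySem.List.pyRange 1 ((fp.length : Int) + 1)).find?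
            (fun k => decide ((paths.map (fun q => if q.take k.toNat == fp.take k.toNat then (1 : Int) else 0)).sum ≤ threshold)) with
        | some k => fp.take k.toNat
        | none => fp
      d.insert tf.1 assigned) PySem.Dict.empty
  out.items

-- ===== PRECONDITION & SPEC =====
-- A raises IndexError via rule[0] exactly when some rule in a value of the rule_paths dict is empty; Pre_ excludes exactly those inputs.
def Pre_assign_group_by_feature_prefix (rule_paths : List (String × List (List String))) (threshold : Int) : Prop :=
  ∀ tp ∈ (PySem.Dict.ofList rule_paths).items, ∀ rule ∈ tp.2, rule ≠ []
instance (rule_paths : List (String × List (List String))) (threshold : Int) : Decidable (Pre_assign_group_by_feature_prefix rule_paths threshold) := by unfold Pre_assign_group_by_feature_prefix; infer_instance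

def pvWitness_assign_group_by_feature_prefix : (List (String × List (List String))) × Int :=
  ([("a", [["f"], ["g"]]), ("b", [["f"]])], 1)

def Spec_assign_group_by_feature_prefix (rule_paths : List (String × List (List String))) (threshold : Int) (out : List (String × List String)) : Prop := out = assign_group_by_feature_prefix_alt rule_paths threshold
instance (rule_paths : List (String × List (List String))) (threshold : Int) (out : List (String × List String)) : Decidable (Spec_assign_group_by_feature_prefix rule_paths threshold out) := by unfold Spec_assign_group_by_feature_prefix; infer_instance

-- ===== CLAIM (what is proved, stated in full; the proofs are below) =====
def Claim_equal_assign_group_by_feature_prefix : Prop := ∀ (rule_paths : List (String × List (List String))) (threshold : Int), Dom_assign_group_by_feature_prefix rule_paths threshold → Pre_assign_group_by_feature_prefix rule_paths threshold → Spec_assign_group_by_feature_prefix rule_paths threshold (assign_group_by_feature_prefix rule_paths threshold)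

-- ===== LEMMAS AND PROOFS =====

-- proof-side names for the pieces of the two ports (definitionally equal to the ports' let-bodies)
def pvGT (items : List (String × List (List String))) : PySem.Dict (List String) (List String) :=
  items.foldl (fun d tp =>
    (PySem.List.pyRange 1 (((pvFeat tp.2).length : Int) + 1)).foldl
      (fun d k => d.modify ((pvFeat tp.2).take k.toNat) [] (fun v => v ++ [tp.1])) d)
    PySem.Dict.empty

def pvAsgA (items : List (String × List (List String))) (threshold : Int) (tp : String × List (List String)) : List String :=
  match (PySem.List.pyRange 1 (((pvFeat tp.2).length : Int) + 1)).find?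
      (fun k => decide ((((pvGT items).getD ((pvFeat tp.2).take k.toNat) []).length : Int) ≤ threshold)) with
  | some k => (pvFeat tp.2).take k.toNat
  | none => pvFeat tp.2

def pvAsgB (paths : List (List String)) (threshold : Int) (tf : String × List String) : List String :=
  match (PySem.List.pyRange 1 ((tf.2.length : Int) + 1)).find?
      (fun k => decide ((paths.map (fun q => if q.take k.toNat == tf.2.take k.toNat then (1 : Int) else 0)).sum ≤ threshold)) with
  | some k => tf.2.take k.toNat
  | none => tf.2

theorem pv_find?_congr {α : Type} {p q : α → Bool} {l : List α}
    (h : ∀ x ∈ l, p x = q x) : l.find? p = l.find? q := by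
  induction l with
  | nil => rfl
  | cons a t ih =>
    simp only [List.find?_cons]
    rw [h a (List.mem_cons_self)]
    cases q a
    · exact ih (fun x hx => h x (List.mem_cons_of_mem _ hx))
    · rfl

-- pyRange 1 (n+1) = [1, 2, …, n] as casts
theorem pv_pyRange_one_map (n : Nat) :
    PySem.List.pyRange 1 ((n : Int) + 1) = List.map (fun i : Nat => ((i : Int) + 1)) (List.range n) := by
  induction n with
  | zero => decide
  | succ m ih =>
    have h1 : ((m + 1 : Nat) : Int) + 1 = ((m : Int) + 1) + 1 := by push_cast; ring
    rw [h1, PySem.List.pyRange_one_succ_right (by omega), ih, List.range_succ]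
    simp

-- the k ∈ range(1, len(fp)+1) with fp[:k] == p: exactly one when p is a nonempty prefix of fp, else none
theorem pv_rangeFilter (fp p : List String) :
    (PySem.List.pyRange 1 ((fp.length : Int) + 1)).filter (fun k => fp.take k.toNat == p)
      = if !p.isEmpty && p.isPrefixOf fp then [(p.length : Int)] else [] := by
  rw [pv_pyRange_one_map, List.filter_map]
  have hpred : ∀ i ∈ List.range fp.length,
      ((fun k : Int => fp.take k.toNat == p) ∘ (fun i : Nat => ((i : Int) + 1))) i
        = (fp.take (i + 1) == p) := by
    intro i _
    simp only [Function.comp_apply]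
    rw [show ((i : Int) + 1).toNat = i + 1 by omega]
  rw [List.filter_congr hpred]
  by_cases hc : p ≠ [] ∧ p <+: fp
  · have hm1 : 1 ≤ p.length := List.length_pos_iff.mpr hc.1
    have hle : p.length ≤ fp.length := hc.2.length_le
    have h2 : ∀ i ∈ List.range fp.length,
        (fp.take (i + 1) == p) = decide (i = p.length - 1) := by
      intro i hi
      rw [List.mem_range] at hi
      rw [Bool.eq_iff_iff]
      simp only [beq_iff_eq, decide_eq_true_eq]
      constructor
      · intro h
        have := congrArg List.length h
        simp only [List.length_take] at this
        omega
      · intro h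
        have h3 : p = fp.take p.length := List.prefix_iff_eq_take.mp hc.2
        rw [show i + 1 = p.length by omega, ← h3]
    rw [List.filter_congr h2, List.filter_eq, List.count_range, if_pos (by omega)]
    rw [if_pos (by simp [List.isPrefixOf_iff_prefix, hc.1, hc.2])]
    simp only [List.replicate, List.map]
    congr 1
    omega
  · rw [if_neg (by
      simp only [Bool.and_eq_true, Bool.not_eq_true', List.isEmpty_eq_false_iff, List.isPrefixOf_iff_prefix]
      intro h; exact hc ⟨h.1, h.2⟩)]
    rw [List.map_eq_nil_iff, List.filter_eq_nil_iff]
    intro i hi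
    rw [List.mem_range] at hi
    simp only [beq_iff_eq]
    intro h
    apply hc
    refine ⟨?_, by rw [← h]; exact List.take_prefix _ _⟩
    intro hp
    rw [hp, List.take_eq_nil_iff] at h
    rcases h with h | h
    · exact absurd h (by omega)
    · rw [h] at hi; simp at hi

-- one item's inner loop: appends the target at every nonempty prefix of its feature path
theorem pv_inner (fp : List String) (t : String) (d : PySem.Dict (List String) (List String)) (p : List String) :
    ((PySem.List.pyRange 1 ((fp.length : Int) + 1)).foldl
        (fun d k => d.modify (fp.take k.toNat) [] (fun v => v ++ [t])) d).getD p []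
      = d.getD p [] ++ (if !p.isEmpty && p.isPrefixOf fp then [t] else []) := by
  have h := PySem.Dict.getD_foldl_modify_append
      ((PySem.List.pyRange 1 ((fp.length : Int) + 1)).map (fun k => (fp.take k.toNat, t))) d p
  rw [List.foldl_map, List.filter_map, List.map_map] at h
  simp only [Function.comp_def] at h
  rw [h, pv_rangeFilter]
  by_cases hc : (!p.isEmpty && p.isPrefixOf fp) = true
  · rw [if_pos hc, if_pos hc]; simp
  · rw [if_neg hc, if_neg hc]; simp

-- the value groups_temp holds at key p after A's first loop
theorem pv_buildA_getD (l : List (String × List (List String))) (d : PySem.Dict (List String) (List String)) (p : List String) :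
    ((l.foldl (fun d tp =>
        (PySem.List.pyRange 1 (((pvFeat tp.2).length : Int) + 1)).foldl
          (fun d k => d.modify ((pvFeat tp.2).take k.toNat) [] (fun v => v ++ [tp.1])) d) d).getD p [])
      = d.getD p [] ++ ((l.filter (fun tp => !p.isEmpty && p.isPrefixOf (pvFeat tp.2))).map (fun tp => tp.1)) := by
  induction l generalizing d with
  | nil => simp
  | cons hd tl ih =>
    rw [List.foldl_cons, ih, pv_inner, List.filter_cons]
    by_cases hc : (!p.isEmpty && p.isPrefixOf (pvFeat hd.2)) = true
    · rw [if_pos hc, if_pos hc]; simp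
    · rw [if_neg hc, if_neg hc]; simp

theorem pv_gt_length (items : List (String × List (List String))) (p : List String) (hp : p ≠ []) :
    ((pvGT items).getD p []).length = items.countP (fun tp => p.isPrefixOf (pvFeat tp.2)) := by
  unfold pvGT
  rw [pv_buildA_getD, PySem.Dict.getD_empty, List.nil_append, List.length_map,
    ← List.countP_eq_length_filter]
  apply List.countP_congr
  intro tp _
  simp [List.isEmpty_eq_false_iff, hp]

-- the two per-target assignments agree
theorem pv_asg_eq (items : List (String × List (List String))) (threshold : Int)
    (tp : String × List (List String)) :
    pvAsgA items threshold tp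
      = pvAsgB (List.map (fun tf => tf.2) (items.map (fun tp => (tp.1, pvFeat tp.2)))) threshold (tp.1, pvFeat tp.2) := by
  unfold pvAsgA pvAsgB
  simp only [List.map_map, Function.comp_def]
  have hfind : ∀ k ∈ PySem.List.pyRange 1 (((pvFeat tp.2).length : Int) + 1),
      (decide ((((pvGT items).getD ((pvFeat tp.2).take k.toNat) []).length : Int) ≤ threshold))
        = (decide ((items.map
            (fun x => if (pvFeat x.2).take k.toNat == (pvFeat tp.2).take k.toNat then (1 : Int) else 0)).sum ≤ threshold)) := by
    intro k hk
    rw [PySem.List.mem_pyRange_one] at hk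
    set fp := pvFeat tp.2 with hfp
    have hk1 : 1 ≤ k.toNat := by omega
    have hk2 : k.toNat ≤ fp.length := by omega
    have hplen : (fp.take k.toNat).length = k.toNat := by
      rw [List.length_take]; omega
    have hpne : fp.take k.toNat ≠ [] := by
      intro h0
      rw [h0] at hplen
      simp at hplen
      omega
    have hcp : items.countP (fun x => (pvFeat x.2).take k.toNat == fp.take k.toNat)
        = items.countP (fun x => (fp.take k.toNat).isPrefixOf (pvFeat x.2)) := by
      apply List.countP_congr
      intro x _
      simp only [beq_iff_eq, List.isPrefixOf_iff_prefix]
      constructor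
      · intro h
        rw [← h]
        exact List.take_prefix _ _
      · intro h
        rw [List.prefix_iff_eq_take.mp h, hplen]
    rw [PySem.List.sum_map_ite_one_zero, hcp, pv_gt_length items _ hpne]
  rw [pv_find?_congr hfind]

set_option maxHeartbeats 1000000 in
theorem pv_portA_eq (rule_paths : List (String × List (List String))) (threshold : Int) :
    assign_group_by_feature_prefix rule_paths threshold
      = (PySem.Dict.ofList rule_paths).items.map
          (fun tp => (tp.1, pvAsgA (PySem.Dict.ofList rule_paths).items threshold tp)) := by
  have h2 : ((PySem.Dict.ofList rule_paths).items.map (fun tp => tp.1)).Nodup :=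
    PySem.Dict.nodup_keys_ofList rule_paths
  have h1 : ∀ a ∈ (PySem.Dict.ofList rule_paths).items,
      (PySem.Dict.empty (κ := String) (ν := List String)).contains a.1 = false :=
    fun a _ => PySem.Dict.contains_empty a.1
  exact PySem.Dict.items_foldl_insert_fresh (PySem.Dict.ofList rule_paths).items
    (fun tp => tp.1) (pvAsgA (PySem.Dict.ofList rule_paths).items threshold)
    PySem.Dict.empty h1 h2

set_option maxHeartbeats 1000000 in
theorem pv_portB_eq (rule_paths : List (String × List (List String))) (threshold : Int) :
    assign_group_by_feature_prefix_alt rule_paths threshold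
      = ((PySem.Dict.ofList rule_paths).items.map (fun tp => (tp.1, pvFeat tp.2))).map
          (fun tf => (tf.1, pvAsgB (((PySem.Dict.ofList rule_paths).items.map (fun tp => (tp.1, pvFeat tp.2))).map (fun tf => tf.2)) threshold tf)) := by
  have h2 : (((PySem.Dict.ofList rule_paths).items.map (fun tp => (tp.1, pvFeat tp.2))).map (fun tf => tf.1)).Nodup := by
    rw [List.map_map]
    exact PySem.Dict.nodup_keys_ofList rule_paths
  have h1 : ∀ a ∈ (PySem.Dict.ofList rule_paths).items.map (fun tp => (tp.1, pvFeat tp.2)),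
      (PySem.Dict.empty (κ := String) (ν := List String)).contains a.1 = false :=
    fun a _ => PySem.Dict.contains_empty a.1
  have key := PySem.Dict.items_foldl_insert_fresh
    ((PySem.Dict.ofList rule_paths).items.map (fun tp => (tp.1, pvFeat tp.2)))
    (fun tf => tf.1)
    (pvAsgB (((PySem.Dict.ofList rule_paths).items.map (fun tp => (tp.1, pvFeat tp.2))).map (fun tf => tf.2)) threshold)
    PySem.Dict.empty h1 h2
  rw [show (PySem.Dict.empty (κ := String) (ν := List String)).items = [] from rfl, List.nil_append] at key
  unfold assign_group_by_feature_prefix_alt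
  exact key

-- ===== VERDICT (by name: the statement is the Claim_ definition above) =====
theorem assign_group_by_feature_prefix_spec : Claim_equal_assign_group_by_feature_prefix := by
  intro rule_paths threshold _ _
  unfold Spec_assign_group_by_feature_prefix
  rw [pv_portA_eq, pv_portB_eq, List.map_map]
  apply List.map_congr_left
  intro tp _
  simp only [Function.comp_apply]
  rw [pv_asg_eq]
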